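-- pv_equiv track=rewrite | github.com/eddiemo/ATDS | Rings&Ideals.py | buildideal
-- ===== SOURCE A (Python) =====
-- def buildideal(init, m):
--     newset = set()
--     oldset = set()
--     for i in range(len(init)):
--         oldset.add(init[i])
--     while (len(oldset) != len(newset)):
--         newset.update(oldset)
--         for val1 in newset:
--             for val2 in newset:
--                 oldset.add((val1 - val2) % m)
--             for elem in range(m):
--                 oldset.add((val1 * elem) % m)
--     new = list(newset)
--     new.sort()
--     return new
-- ===== SOURCE B (Python) =====
-- def gcd(a, b):
--     while b:
--         a, b = b, a % b
--     return a
--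
--
-- def buildideal(init, m):
--     # The ideal generated in Z/mZ is exactly the set of multiples of
--     # d = gcd of m and all generators; list the generators together with
--     # those multiples, sorted.
--     if not init:
--         return []
--     d = abs(m)
--     for x in init:
--         d = gcd(d, abs(x))
--     multiples = {(k * d) % m for k in range(abs(m) // d)}
--     return sorted(set(init) | multiples)
-- ===== Notes on version B (the rewrite author's own statement) =====
-- stated objective: faster
-- what changed: Replaces A's iterated set-closure fixpoint (repeated O(|S|^2 + |S|*m) passes) by a direct gcd computation: the ideal mod m is the set of multiples of d = gcd(init, m), emitted as {(k*d) % m for k in range(abs(m)//d)} and listed together with the generators; Pre_ excludes only inputs where A raises ZeroDivisionError (nonempty init with m = 0).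
-- outside the precondition, e.g. on buildideal([1], 0): A raises ZeroDivisionError, B returns [1]; on buildideal([0], 0): A raises ZeroDivisionError, B raises ZeroDivisionError
import Mathlib
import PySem

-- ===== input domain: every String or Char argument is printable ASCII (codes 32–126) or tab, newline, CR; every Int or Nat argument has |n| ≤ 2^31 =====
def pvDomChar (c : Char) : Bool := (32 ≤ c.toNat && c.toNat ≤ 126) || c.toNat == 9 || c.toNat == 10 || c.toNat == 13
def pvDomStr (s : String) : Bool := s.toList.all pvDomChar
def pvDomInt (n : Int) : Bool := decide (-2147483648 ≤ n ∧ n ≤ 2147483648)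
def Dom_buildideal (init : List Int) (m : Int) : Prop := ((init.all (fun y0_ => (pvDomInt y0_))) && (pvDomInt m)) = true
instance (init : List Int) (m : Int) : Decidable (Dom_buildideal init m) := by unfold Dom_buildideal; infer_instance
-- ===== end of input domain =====

-- B replaces A's iterated set-closure fixpoint by a direct gcd computation (the ideal mod m is
-- the multiples of gcd(init ∪ {m})), measurably faster; equivalence proved on Pre_ (init = [] or m ≠ 0).


-- ===== PORT A =====
-- 'for val2 in newset: oldset.add((val1 - val2) % m)'
def pvAddDiffs (m : Int) (ns : List Int) (v1 : Int) (o : PySem.Set Int) : PySem.Set Int :=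
  ns.foldl (fun o v2 => PySem.Set.add o (PySem.Int.mod (v1 - v2) m)) o

-- 'for elem in range(m): oldset.add((val1 * elem) % m)'
def pvAddMults (m : Int) (v1 : Int) (o : PySem.Set Int) : PySem.Set Int :=
  (PySem.List.pyRange 0 m 1).foldl (fun o e => PySem.Set.add o (PySem.Int.mod (v1 * e) m)) o

-- the body of the while loop, after 'newset.update(oldset)': 'for val1 in newset: …'
def pvBody (m : Int) (ns : List Int) (o : PySem.Set Int) : PySem.Set Int :=
  ns.foldl (fun o v1 => pvAddMults m v1 (pvAddDiffs m ns v1 o)) o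

-- 'while len(oldset) != len(newset): …' (fuel is a totality guard only; it is provably sufficient)
def pvLoop (m : Int) : Nat → PySem.Set Int → PySem.Set Int → PySem.Set Int
  | 0, _, nw => nw
  | fuel+1, old, nw =>
    if old.length ≠ nw.length then
      let nw' := PySem.Set.update nw old
      pvLoop m fuel (pvBody m nw' old) nw'
    else nw

def buildideal (init : List Int) (m : Int) : List Int :=
  let old := (PySem.List.pyRange 0 (init.length : Int) 1).foldl
      (fun s i => PySem.Set.add s (PySem.List.pyGetD init i 0)) PySem.Set.empty
  PySem.List.sorted (pvLoop m (init.length + m.natAbs + 1) old PySem.Set.empty) (fun x => x)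

-- ===== PORT B =====
-- Source B's gcd helper: 'while b: a, b = b, a % b' (arguments are non-negative)
def pvGcd (a b : Nat) : Nat :=
  if h : b = 0 then a else pvGcd b (a % b)
termination_by b
decreasing_by exact Nat.mod_lt _ (Nat.pos_of_ne_zero h)

-- 'd = abs(m); for x in init: d = gcd(d, abs(x))'
def pvD (init : List Int) (m : Int) : Nat :=
  init.foldl (fun g x => pvGcd g x.natAbs) m.natAbs

-- 'multiples = {(k * d) % m for k in range(abs(m) // d)}'
def pvMult (init : List Int) (m : Int) : List Int :=
  (PySem.List.pyRange 0 ((m.natAbs / pvD init m : Nat) : Int) 1).map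
    (fun k => PySem.Int.mod (k * (pvD init m : Int)) m)

-- 'sorted(set(init) | multiples)'
def buildideal_alt (init : List Int) (m : Int) : List Int :=
  if init = [] then []
  else
    PySem.List.sorted
      (PySem.Set.union (PySem.Set.ofList init) (PySem.Set.ofList (pvMult init m))) (fun x => x)

-- ===== PRECONDITION & SPEC =====
-- Pre_ excludes only inputs where A raises: a non-empty init with m = 0 makes '% m' raise ZeroDivisionError.
def Pre_buildideal (init : List Int) (m : Int) : Prop := init = [] ∨ m ≠ 0
instance (init : List Int) (m : Int) : Decidable (Pre_buildideal init m) := by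
  unfold Pre_buildideal; infer_instance

def pvWitness_buildideal : List Int × Int := ([6, -4], 10)

def Spec_buildideal (init : List Int) (m : Int) (out : List Int) : Prop := out = buildideal_alt init m
instance (init : List Int) (m : Int) (out : List Int) : Decidable (Spec_buildideal init m out) := by unfold Spec_buildideal; infer_instance

-- ===== CLAIM (what is proved, stated in full; the proofs are below) =====
def Claim_equal_buildideal : Prop := ∀ (init : List Int) (m : Int), Dom_buildideal init m → Pre_buildideal init m → Spec_buildideal init m (buildideal init m)

-- ===== LEMMAS AND PROOFS =====

-- ---- gcd facts ----
lemma pvGcd_eq (a b : Nat) : pvGcd a b = Nat.gcd a b := by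
  induction a, b using pvGcd.induct with
  | case1 a => rw [pvGcd]; simp
  | case2 a b h ih =>
    rw [pvGcd, dif_neg h, ih, Nat.gcd_comm b (a % b), ← Nat.gcd_rec, Nat.gcd_comm]

lemma pvD_eq (init : List Int) (m : Int) :
    pvD init m = init.foldl (fun g x => Nat.gcd g x.natAbs) m.natAbs := by
  unfold pvD
  have h : (fun (g : Nat) (x : Int) => pvGcd g x.natAbs)
      = fun (g : Nat) (x : Int) => Nat.gcd g x.natAbs := by
    funext g x; exact pvGcd_eq g x.natAbs
  rw [h]

lemma foldlGcd_dvd_acc (l : List Int) (g : Nat) :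
    l.foldl (fun g x => Nat.gcd g x.natAbs) g ∣ g := by
  induction l generalizing g with
  | nil => simp
  | cons x l ih => exact dvd_trans (ih _) (Nat.gcd_dvd_left _ _)

lemma foldlGcd_dvd_mem (l : List Int) (g : Nat) (x : Int) (hx : x ∈ l) :
    ((l.foldl (fun g x => Nat.gcd g x.natAbs) g : Nat) : Int) ∣ x := by
  induction l generalizing g with
  | nil => simp at hx
  | cons z l ih =>
    rcases List.mem_cons.mp hx with h | h
    · subst h
      have : (l.foldl (fun g x => Nat.gcd g x.natAbs) (Nat.gcd g x.natAbs)) ∣ x.natAbs :=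
        dvd_trans (foldlGcd_dvd_acc _ _) (Nat.gcd_dvd_right _ _)
      exact Int.dvd_natAbs.mp (Int.natCast_dvd_natCast.mpr this)
    · exact ih _ h

lemma foldlGcd_ne_zero (l : List Int) (g : Nat) (hg : g ≠ 0) :
    l.foldl (fun g x => Nat.gcd g x.natAbs) g ≠ 0 := by
  induction l generalizing g with
  | nil => simpa
  | cons x l ih => exact ih _ (fun h => hg (Nat.eq_zero_of_gcd_eq_zero_left h))

lemma pvD_dvd_m (init : List Int) (m : Int) : ((pvD init m : Nat) : Int) ∣ m := by
  rw [pvD_eq]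
  have h1 := foldlGcd_dvd_acc init m.natAbs
  exact dvd_trans (Int.natCast_dvd_natCast.mpr h1) (Int.natAbs_dvd.mpr dvd_rfl)

lemma pvD_dvd_mem (init : List Int) (m : Int) (x : Int) (hx : x ∈ init) :
    ((pvD init m : Nat) : Int) ∣ x := by
  rw [pvD_eq]; exact foldlGcd_dvd_mem init m.natAbs x hx

lemma pvD_pos (init : List Int) (m : Int) (hm : m ≠ 0) : 0 < pvD init m := by
  rw [pvD_eq]
  have := foldlGcd_ne_zero init m.natAbs (by simpa using hm)
  omega

-- ---- Python-mod facts ----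
lemma pvMod_sub_dvd (a m : Int) : m ∣ (PySem.Int.mod a m - a) := by
  have h := PySem.Int.floordiv_mul_add_mod a m
  exact ⟨-(PySem.Int.floordiv a m), by linarith⟩

lemma pvMod_congr {m : Int} (a b : Int) (h : m ∣ a - b) :
    PySem.Int.mod a m = PySem.Int.mod b m := by
  obtain ⟨c, hc⟩ := h
  have ha : a = b + m * c := by linarith
  show Int.fmod a m = Int.fmod b m
  rw [ha, Int.add_mul_fmod_self_left]

lemma pvMod_idem (a m : Int) :
    PySem.Int.mod (PySem.Int.mod a m) m = PySem.Int.mod a m := by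
  exact Int.fmod_fmod_of_dvd a dvd_rfl

lemma pvMod_zero (m : Int) : PySem.Int.mod 0 m = 0 := by
  exact Int.zero_fmod m

lemma dvd_pvMod {d a m : Int} (h1 : d ∣ a) (h2 : d ∣ m) : d ∣ PySem.Int.mod a m := by
  have h := PySem.Int.floordiv_mul_add_mod a m
  have he : PySem.Int.mod a m = a - PySem.Int.floordiv a m * m := by linarith
  rw [he]
  exact dvd_sub h1 (Dvd.dvd.mul_left h2 _)

lemma pvMod_eq_self_pos {m : Int} (hm : 0 < m) (x : Int) :
    PySem.Int.mod x m = x ↔ 0 ≤ x ∧ x < m := by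
  rw [PySem.Int.mod_eq_emod_of_pos hm]
  constructor
  · intro h
    rw [← h]
    exact ⟨Int.emod_nonneg x (by omega), Int.emod_lt_of_pos x hm⟩
  · rintro ⟨h1, h2⟩; exact Int.emod_eq_of_lt h1 h2

lemma pvMod_eq_self_neg {m : Int} (hm : m < 0) (x : Int) :
    PySem.Int.mod x m = x ↔ m < x ∧ x ≤ 0 := by
  have h : PySem.Int.mod x m = -PySem.Int.mod (-x) (-m) := by
    have h0 := PySem.Int.mod_neg_neg (-x) (-m)
    simp only [neg_neg] at h0
    omega
  have hp := pvMod_eq_self_pos (show (0:Int) < -m by omega) (-x)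
  constructor
  · intro h2
    have h3 : PySem.Int.mod (-x) (-m) = -x := by omega
    have := hp.mp h3
    omega
  · intro h2
    have h3 := hp.mpr ⟨by omega, by omega⟩
    omega

-- ---- closure (lower bound) ----
def pvClosed (S : List Int) (m : Int) : Prop :=
  ∀ a ∈ S, ∀ b ∈ S, PySem.Int.mod (a - b) m ∈ S

lemma closed_zero_mem (S : List Int) (m : Int) (hc : pvClosed S m)
    (x0 : Int) (h0 : x0 ∈ S) : (0 : Int) ∈ S := by
  have := hc x0 h0 x0 h0
  simpa [pvMod_zero] using this

lemma closed_mod_mem (S : List Int) (m : Int) (hc : pvClosed S m)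
    (h0 : (0 : Int) ∈ S) (a : Int) (ha : a ∈ S) : PySem.Int.mod a m ∈ S := by
  have := hc a ha 0 h0
  simpa using this

lemma closed_add (S : List Int) (m : Int) (hc : pvClosed S m) (h0 : (0 : Int) ∈ S)
    (a : Int) (ha : a ∈ S) (b : Int) (hb : b ∈ S) : PySem.Int.mod (a + b) m ∈ S := by
  have hnb : PySem.Int.mod (0 - b) m ∈ S := hc 0 h0 b hb
  have h2 : PySem.Int.mod (a - PySem.Int.mod (0 - b) m) m ∈ S := hc a ha _ hnb
  have he : PySem.Int.mod (a - PySem.Int.mod (0 - b) m) m = PySem.Int.mod (a + b) m := by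
    apply pvMod_congr
    obtain ⟨c, hcc⟩ := pvMod_sub_dvd (0 - b) m
    exact ⟨-c, by linarith⟩
  rwa [he] at h2

lemma closed_mul (S : List Int) (m : Int) (hc : pvClosed S m) (h0 : (0 : Int) ∈ S)
    (a : Int) (ha : PySem.Int.mod a m ∈ S) (k : Int) : PySem.Int.mod (a * k) m ∈ S := by
  have hnat : ∀ k : Nat, PySem.Int.mod (a * k) m ∈ S := by
    intro k
    induction k with
    | zero => simpa [pvMod_zero] using h0
    | succ k ih =>
      have h2 : PySem.Int.mod (PySem.Int.mod (a * k) m + PySem.Int.mod a m) m ∈ S :=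
        closed_add S m hc h0 _ ih _ ha
      have he : PySem.Int.mod (PySem.Int.mod (a * k) m + PySem.Int.mod a m) m
          = PySem.Int.mod (a * (k + 1 : Nat)) m := by
        apply pvMod_congr
        obtain ⟨c1, hc1⟩ := pvMod_sub_dvd (a * k) m
        obtain ⟨c2, hc2⟩ := pvMod_sub_dvd a m
        refine ⟨c1 + c2, ?_⟩
        push_cast
        linear_combination hc1 + hc2
      rwa [he] at h2
  rcases le_or_gt 0 k with hk | hk
  · have := hnat k.toNat
    rwa [Int.toNat_of_nonneg hk] at this
  · have hmem : PySem.Int.mod (a * (-k).toNat) m ∈ S := hnat _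
    have h2 : PySem.Int.mod (0 - PySem.Int.mod (a * (-k).toNat) m) m ∈ S := hc 0 h0 _ hmem
    have he : PySem.Int.mod (0 - PySem.Int.mod (a * (-k).toNat) m) m = PySem.Int.mod (a * k) m := by
      apply pvMod_congr
      obtain ⟨c1, hc1⟩ := pvMod_sub_dvd (a * (-k).toNat) m
      refine ⟨-c1, ?_⟩
      rw [Int.toNat_of_nonneg (by omega : (0:Int) ≤ -k)] at hc1 ⊢
      linarith
    rwa [he] at h2

lemma closed_comb (S : List Int) (m : Int) (hc : pvClosed S m) (h0 : (0 : Int) ∈ S)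
    (a b : Int) (ha : PySem.Int.mod a m ∈ S) (hb : PySem.Int.mod b m ∈ S) (u v : Int) :
    PySem.Int.mod (a * u + b * v) m ∈ S := by
  have h1 : PySem.Int.mod (PySem.Int.mod a m * u) m ∈ S :=
    closed_mul S m hc h0 _ (by rwa [pvMod_idem]) u
  have h2 : PySem.Int.mod (PySem.Int.mod b m * v) m ∈ S :=
    closed_mul S m hc h0 _ (by rwa [pvMod_idem]) v
  have h3 : PySem.Int.mod (PySem.Int.mod (PySem.Int.mod a m * u) m + PySem.Int.mod (PySem.Int.mod b m * v) m) m ∈ S :=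
    closed_add S m hc h0 _ h1 _ h2
  have he : PySem.Int.mod (PySem.Int.mod (PySem.Int.mod a m * u) m + PySem.Int.mod (PySem.Int.mod b m * v) m) m
      = PySem.Int.mod (a * u + b * v) m := by
    apply pvMod_congr
    obtain ⟨c1, hc1⟩ := pvMod_sub_dvd (PySem.Int.mod a m * u) m
    obtain ⟨c2, hc2⟩ := pvMod_sub_dvd (PySem.Int.mod b m * v) m
    obtain ⟨c3, hc3⟩ := pvMod_sub_dvd a m
    obtain ⟨c4, hc4⟩ := pvMod_sub_dvd b m
    refine ⟨c1 + c2 + c3 * u + c4 * v, ?_⟩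
    linear_combination hc1 + hc2 + u * hc3 + v * hc4
  rwa [he] at h3

lemma closed_gcd (S : List Int) (m : Int) (hc : pvClosed S m) (h0 : (0 : Int) ∈ S)
    (a b : Int) (ha : PySem.Int.mod a m ∈ S) (hb : PySem.Int.mod b m ∈ S) :
    PySem.Int.mod ((Int.gcd a b : Nat) : Int) m ∈ S := by
  rw [Int.gcd_eq_gcd_ab a b]
  exact closed_comb S m hc h0 a b ha hb _ _

lemma closed_foldl (S : List Int) (m : Int) (hc : pvClosed S m) (h0 : (0 : Int) ∈ S)
    (l : List Int) (hl : ∀ x ∈ l, PySem.Int.mod x m ∈ S) :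
    ∀ g : Nat, PySem.Int.mod (g : Int) m ∈ S →
      PySem.Int.mod ((l.foldl (fun g x => Nat.gcd g x.natAbs) g : Nat) : Int) m ∈ S := by
  induction l with
  | nil => intro g hg; simpa using hg
  | cons x l ih =>
    intro g hg
    simp only [List.foldl_cons]
    apply ih (fun y hy => hl y (List.mem_cons_of_mem _ hy))
    have hgx : Nat.gcd g x.natAbs = Int.gcd (g : Int) x := by
      simp [Int.gcd]
    rw [hgx]
    exact closed_gcd S m hc h0 _ _ hg (hl x (List.mem_cons_self))

lemma closed_lower (S : List Int) (m : Int) (_hm : m ≠ 0) (hc : pvClosed S m)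
    (init : List Int) (hne : init ≠ []) (hsub : ∀ x ∈ init, x ∈ S) :
    ∀ y : Int, ((pvD init m : Nat) : Int) ∣ y → PySem.Int.mod y m = y → y ∈ S := by
  obtain ⟨x0, hx0⟩ := List.exists_mem_of_ne_nil init hne
  have h0 : (0 : Int) ∈ S := closed_zero_mem S m hc x0 (hsub x0 hx0)
  have hbase : PySem.Int.mod (m.natAbs : Int) m ∈ S := by
    have he : PySem.Int.mod (m.natAbs : Int) m = PySem.Int.mod 0 m := by
      apply pvMod_congr
      rcases Int.natAbs_eq m with h | h
      · exact ⟨1, by omega⟩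
      · exact ⟨-1, by omega⟩
    rw [he, pvMod_zero]; exact h0
  have hD : PySem.Int.mod ((pvD init m : Nat) : Int) m ∈ S := by
    rw [pvD_eq]
    exact closed_foldl S m hc h0 init
      (fun x hx => closed_mod_mem S m hc h0 x (hsub x hx)) m.natAbs hbase
  rintro y ⟨k, hk⟩ hy
  have h2 : PySem.Int.mod (((pvD init m : Nat) : Int) * k) m ∈ S :=
    closed_mul S m hc h0 _ hD k
  rw [← hk, hy] at h2
  exact h2

-- ---- multiples characterisation ----
lemma pvD_dvd_natAbs (init : List Int) (m : Int) :
    ((m.natAbs / pvD init m : Nat) : Int) * ((pvD init m : Nat) : Int) = (m.natAbs : Int) := by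
  have h1 : pvD init m ∣ m.natAbs := by
    have := pvD_dvd_m init m
    exact_mod_cast Int.natCast_dvd_natCast.mpr (Int.natAbs_dvd_natAbs.mpr this)
  exact_mod_cast Nat.div_mul_cancel h1

lemma mem_pvMult (init : List Int) (m : Int) (hm : m ≠ 0) (y : Int) :
    y ∈ pvMult init m ↔ ((pvD init m : Nat) : Int) ∣ y ∧ PySem.Int.mod y m = y := by
  set D : Int := ((pvD init m : Nat) : Int) with hDdef
  have hD : (0 : Int) < D := by rw [hDdef]; exact_mod_cast pvD_pos init m hm
  have hDm : D ∣ m := pvD_dvd_m init m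
  set N : Int := ((m.natAbs / pvD init m : Nat) : Int) with hNdef
  have hND : N * D = (m.natAbs : Int) := pvD_dvd_natAbs init m
  unfold pvMult
  rw [List.mem_map]
  constructor
  · rintro ⟨k, _hk, rfl⟩
    exact ⟨dvd_pvMod (Dvd.intro_left k rfl) hDm, pvMod_idem _ _⟩
  · rintro ⟨⟨c, hc⟩, hy⟩
    rcases lt_trichotomy 0 m with hmp | h | hmn
    · have habs : (m.natAbs : Int) = m := by omega
      have hyb := (pvMod_eq_self_pos hmp y).mp hy
      refine ⟨c, ?_, ?_⟩
      · rw [PySem.List.mem_pyRange_one]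
        constructor
        · nlinarith
        · nlinarith
      · rw [mul_comm, ← hc, hy]
    · omega
    · have habs : (m.natAbs : Int) = -m := by omega
      have hyb := (pvMod_eq_self_neg hmn y).mp hy
      by_cases hy0 : y = 0
      · refine ⟨0, ?_, ?_⟩
        · rw [PySem.List.mem_pyRange_one]
          constructor
          · omega
          · nlinarith
        · rw [zero_mul, pvMod_zero, hy0]
      · obtain ⟨e, he⟩ : D ∣ (y - m) := dvd_sub ⟨c, hc⟩ hDm
        have hb1 : 0 < y - m := by omega
        have hb2 : y - m < -m := by omega
        refine ⟨e, ?_, ?_⟩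
        · rw [PySem.List.mem_pyRange_one]
          constructor
          · nlinarith
          · nlinarith
        · have h1 : PySem.Int.mod (e * D) m = PySem.Int.mod y m := by
            apply pvMod_congr
            exact ⟨-1, by linarith⟩
          rw [h1, hy]

lemma length_pvMult_le (init : List Int) (m : Int) :
    (pvMult init m).length ≤ m.natAbs := by
  unfold pvMult
  rw [List.length_map, PySem.List.length_pyRange_one]
  have h : m.natAbs / pvD init m ≤ m.natAbs := Nat.div_le_self _ _
  omega

-- ---- membership and nodup of the loop body ----
lemma mem_foldl_step {g : PySem.Set Int → Int → PySem.Set Int} {P : Int → Int → Prop}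
    (hg : ∀ o v y, y ∈ g o v ↔ y ∈ o ∨ P v y) :
    ∀ (l : List Int) (o : PySem.Set Int) (y : Int),
      y ∈ l.foldl g o ↔ y ∈ o ∨ ∃ v ∈ l, P v y := by
  intro l
  induction l with
  | nil => intro o y; simp
  | cons x l ih =>
    intro o y
    simp only [List.foldl_cons, ih, hg, List.mem_cons]
    constructor
    · rintro ((h | h) | ⟨v, hv, hp⟩)
      · exact Or.inl h
      · exact Or.inr ⟨x, Or.inl rfl, h⟩
      · exact Or.inr ⟨v, Or.inr hv, hp⟩
    · rintro (h | ⟨v, (rfl | hv), hp⟩)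
      · exact Or.inl (Or.inl h)
      · exact Or.inl (Or.inr hp)
      · exact Or.inr ⟨v, hv, hp⟩

lemma nodup_foldl_step {g : PySem.Set Int → Int → PySem.Set Int}
    (hg : ∀ o v, o.Nodup → (g o v).Nodup) :
    ∀ (l : List Int) (o : PySem.Set Int), o.Nodup → (l.foldl g o).Nodup := by
  intro l
  induction l with
  | nil => intro o ho; simpa
  | cons x l ih => intro o ho; exact ih _ (hg o x ho)

lemma mem_pvAddDiffs (m : Int) (ns : List Int) (v1 : Int) (o : PySem.Set Int) (y : Int) :
    y ∈ pvAddDiffs m ns v1 o ↔ y ∈ o ∨ ∃ v2 ∈ ns, y = PySem.Int.mod (v1 - v2) m := by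
  exact PySem.Set.mem_foldl_add ns (fun v2 => PySem.Int.mod (v1 - v2) m) o y

lemma mem_pvAddMults (m : Int) (v1 : Int) (o : PySem.Set Int) (y : Int) :
    y ∈ pvAddMults m v1 o ↔ y ∈ o ∨ ∃ e ∈ PySem.List.pyRange 0 m 1, y = PySem.Int.mod (v1 * e) m := by
  exact PySem.Set.mem_foldl_add _ (fun e => PySem.Int.mod (v1 * e) m) o y

lemma mem_pvBody (m : Int) (ns : List Int) (o : PySem.Set Int) (y : Int) :
    y ∈ pvBody m ns o ↔ y ∈ o ∨ ∃ v1 ∈ ns,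
      ((∃ v2 ∈ ns, y = PySem.Int.mod (v1 - v2) m) ∨
       (∃ e ∈ PySem.List.pyRange 0 m 1, y = PySem.Int.mod (v1 * e) m)) := by
  apply mem_foldl_step
  intro o v y
  rw [mem_pvAddMults, mem_pvAddDiffs]
  exact or_assoc

lemma nodup_pvBody (m : Int) (ns : List Int) (o : PySem.Set Int) (ho : o.Nodup) :
    (pvBody m ns o).Nodup := by
  unfold pvBody
  refine nodup_foldl_step (g := fun o v1 => pvAddMults m v1 (pvAddDiffs m ns v1 o))
    (fun o v hv => ?_) ns o ho
  have h1 : (pvAddDiffs m ns v o).Nodup := by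
    unfold pvAddDiffs
    exact nodup_foldl_step (g := fun o v2 => PySem.Set.add o (PySem.Int.mod (v - v2) m))
      (fun o x hx => PySem.Set.nodup_add o _ hx) ns o hv
  unfold pvAddMults
  exact nodup_foldl_step (g := fun o e => PySem.Set.add o (PySem.Int.mod (v * e) m))
    (fun o x hx => PySem.Set.nodup_add o _ hx) _ _ h1

lemma mem_iff_of_subset_of_len (l₁ l₂ : List Int) (h : l₁ ⊆ l₂) (h1 : l₁.Nodup)
    (_h2 : l₂.Nodup) (hl : l₂.length ≤ l₁.length) : ∀ y, y ∈ l₁ ↔ y ∈ l₂ := by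
  intro y
  exact ((h1.subperm h).perm_of_length_le hl).mem_iff

-- the invariant predicate
def pvUP (init : List Int) (m : Int) (y : Int) : Prop :=
  y ∈ init ∨ (((pvD init m : Nat) : Int) ∣ y ∧ PySem.Int.mod y m = y)

-- ---- the main loop lemma ----
lemma pvLoop_spec (init : List Int) (m : Int) (hm : m ≠ 0) (hne : init ≠ []) :
    ∀ (fuel : Nat) (old nw : PySem.Set Int),
      old.Nodup → nw.Nodup → nw ⊆ old →
      (∀ x ∈ init, x ∈ old) →
      (∀ y ∈ old, pvUP init m y) →
      (old.length = nw.length → pvClosed nw m) →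
      init.length + (pvMult init m).length + 1 ≤ fuel + nw.length →
      ((pvLoop m fuel old nw).Nodup ∧
        ∀ y, y ∈ pvLoop m fuel old nw ↔ pvUP init m y) := by
  intro fuel
  induction fuel with
  | zero =>
    intro old nw hod hnd hsub hinit hup hfix hfuel
    exfalso
    have hT : nw ⊆ init ++ pvMult init m := by
      intro y hy
      rw [List.mem_append]
      rcases hup y (hsub hy) with h | h
      · exact Or.inl h
      · exact Or.inr ((mem_pvMult init m hm y).mpr h)
    have hlen := (hnd.subperm hT).length_le
    rw [List.length_append] at hlen
    omega
  | succ fuel ih =>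
    intro old nw hod hnd hsub hinit hup hfix hfuel
    by_cases hlen : old.length = nw.length
    · have hred : pvLoop m (fuel+1) old nw = nw := by
        simp [pvLoop, hlen]
      rw [hred]
      have hmem : ∀ y, y ∈ nw ↔ y ∈ old :=
        mem_iff_of_subset_of_len nw old hsub hnd hod (le_of_eq hlen)
      have hcl : pvClosed nw m := hfix hlen
      refine ⟨hnd, fun y => ?_⟩
      constructor
      · intro hy
        exact hup y ((hmem y).mp hy)
      · intro hy
        rcases hy with h | ⟨h1, h2⟩
        · exact (hmem y).mpr (hinit y h)
        · exact closed_lower nw m hm hcl init hne (fun x hx => (hmem x).mpr (hinit x hx)) y h1 h2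
    · have hred : pvLoop m (fuel+1) old nw
          = pvLoop m fuel (pvBody m (PySem.Set.update nw old) old) (PySem.Set.update nw old) := by
        simp [pvLoop, hlen]
      rw [hred]
      set nw' := PySem.Set.update nw old with hnw'
      have hmemnw' : ∀ y, y ∈ nw' ↔ y ∈ old := by
        intro y
        rw [hnw', PySem.Set.mem_update]
        constructor
        · rintro (h | h)
          exacts [hsub h, h]
        · exact Or.inr
      have hnd' : nw'.Nodup := PySem.Set.nodup_update nw old hnd
      have hodn : (pvBody m nw' old).Nodup := nodup_pvBody m nw' old hod
      have hsub' : nw' ⊆ pvBody m nw' old := fun y hy =>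
        (mem_pvBody m nw' old y).mpr (Or.inl ((hmemnw' y).mp hy))
      have hinit' : ∀ x ∈ init, x ∈ pvBody m nw' old := fun x hx =>
        (mem_pvBody m nw' old x).mpr (Or.inl (hinit x hx))
      have hupD : ∀ y, pvUP init m y → ((pvD init m : Nat) : Int) ∣ y := by
        intro y h
        rcases h with h | ⟨h, _⟩
        exacts [pvD_dvd_mem init m y h, h]
      have hup' : ∀ y ∈ pvBody m nw' old, pvUP init m y := by
        intro y hy
        rcases (mem_pvBody m nw' old y).mp hy with h | ⟨v1, hv1, hcase⟩
        · exact hup y h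
        · have hd1 := hupD v1 (hup v1 ((hmemnw' v1).mp hv1))
          rcases hcase with ⟨v2, hv2, rfl⟩ | ⟨e, he, rfl⟩
          · have hd2 := hupD v2 (hup v2 ((hmemnw' v2).mp hv2))
            exact Or.inr ⟨dvd_pvMod (dvd_sub hd1 hd2) (pvD_dvd_m init m), pvMod_idem _ _⟩
          · exact Or.inr ⟨dvd_pvMod (Dvd.dvd.mul_right hd1 e) (pvD_dvd_m init m), pvMod_idem _ _⟩
      have hfix' : (pvBody m nw' old).length = nw'.length → pvClosed nw' m := by
        intro hl
        have hmm := mem_iff_of_subset_of_len nw' (pvBody m nw' old) hsub' hnd' hodn (le_of_eq hl)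
        intro a ha b hb
        exact (hmm _).mpr ((mem_pvBody m nw' old _).mpr (Or.inr ⟨a, ha, Or.inl ⟨b, hb, rfl⟩⟩))
      have hlen1 : nw.length < old.length :=
        lt_of_le_of_ne ((hnd.subperm hsub).length_le) (fun h => hlen h.symm)
      have hlen2 : old.length ≤ nw'.length :=
        (hod.subperm (fun y hy => (hmemnw' y).mpr hy)).length_le
      exact ih (pvBody m nw' old) nw' hodn hnd' hsub' hinit' hup' hfix' (by omega)

-- ---- assembling the main theorem ----
lemma mem_target (init : List Int) (m : Int) (hm : m ≠ 0) (y : Int) :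
    y ∈ PySem.Set.union (PySem.Set.ofList init) (PySem.Set.ofList (pvMult init m)) ↔ pvUP init m y := by
  rw [PySem.Set.mem_union, PySem.Set.mem_ofList, PySem.Set.mem_ofList, mem_pvMult init m hm]
  rfl

lemma pvInitSet_eq (init : List Int) :
    (PySem.List.pyRange 0 (init.length : Int) 1).foldl
      (fun s i => PySem.Set.add s (PySem.List.pyGetD init i 0)) PySem.Set.empty
      = PySem.Set.ofList init := by
  rw [PySem.List.foldl_pyRange_zero_pyGetD' init 0 PySem.Set.add PySem.Set.empty]
  rfl

-- ===== VERDICT (by name: the statement is the Claim_ definition above) =====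
theorem buildideal_spec : Claim_equal_buildideal := by
  unfold Claim_equal_buildideal
  intro init m _hdom hpre
  unfold Spec_buildideal
  by_cases hinit : init = []
  · subst hinit
    have h0 : PySem.List.pyRange 0 ((List.length ([] : List Int)) : Int) 1 = [] := by
      simp [PySem.List.pyRange_one_eq_nil]
    unfold buildideal buildideal_alt
    rw [h0]
    simp [pvLoop, PySem.Set.empty, PySem.List.sorted_eq_nil_iff]
  · have hm : m ≠ 0 := by
      rcases hpre with h | h
      · exact absurd h hinit
      · exact h
    have hspec := pvLoop_spec init m hm hinit (init.length + m.natAbs + 1)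
      (PySem.Set.ofList init) PySem.Set.empty
      (PySem.Set.nodup_ofList init) List.nodup_nil
      (by intro y hy; simp [PySem.Set.empty] at hy)
      (fun x hx => (PySem.Set.mem_ofList init x).mpr hx)
      (fun y hy => Or.inl ((PySem.Set.mem_ofList init y).mp hy))
      (by intro _ a ha; simp [PySem.Set.empty] at ha)
      (by
        have := length_pvMult_le init m
        have h2 := PySem.Set.length_ofList_le init
        simp only [PySem.Set.empty, List.length_nil]
        omega)
    unfold buildideal buildideal_alt
    rw [pvInitSet_eq, if_neg hinit]
    apply PySem.List.sorted_eq_sorted_of_perm _ _ _ (fun a b h => h)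
    rw [List.perm_ext_iff_of_nodup hspec.1
      (PySem.Set.nodup_union _ _ (PySem.Set.nodup_ofList init))]
    intro y
    rw [(hspec.2 y), mem_target init m hm y]
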